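-- pv_equiv track=rewrite | github.com/mhogan26/Parasol | adversarial_traces/rl_code/trace_optimize_binary_backup.py | update_sym_sizes
-- ===== SOURCE A (Python) =====
-- def update_sym_sizes(symbolics_opt, sizes, symbolics):
--     for var in symbolics_opt:
--         if var in sizes:
--             sizes[var] = symbolics_opt[var]
--             continue
--         if var in symbolics:
--             symbolics[var] = symbolics_opt[var]
--
--     return sizes, symbolics
-- ===== SOURCE B (Python) =====
-- def update_sym_sizes(symbolics_opt, sizes, symbolics):
--     # Builds fresh dicts via comprehensions over the targets instead of
--     # mutating them in place while looping over symbolics_opt.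
--     sizes = {k: (symbolics_opt[k] if k in symbolics_opt else v)
--              for k, v in sizes.items()}
--     symbolics = {k: (symbolics_opt[k] if (k in symbolics_opt and k not in sizes) else v)
--                  for k, v in symbolics.items()}
--     return sizes, symbolics
-- ===== Notes on version B (the rewrite author's own statement) =====
-- stated objective: idiomatic
-- what changed: A loops over the source dict mutating sizes/symbolics in place with a continue-guarded branch; B rebuilds the two dicts with comprehensions driven by the targets themselves (return values identical; A mutates its arguments, B does not).
import Mathlib
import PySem

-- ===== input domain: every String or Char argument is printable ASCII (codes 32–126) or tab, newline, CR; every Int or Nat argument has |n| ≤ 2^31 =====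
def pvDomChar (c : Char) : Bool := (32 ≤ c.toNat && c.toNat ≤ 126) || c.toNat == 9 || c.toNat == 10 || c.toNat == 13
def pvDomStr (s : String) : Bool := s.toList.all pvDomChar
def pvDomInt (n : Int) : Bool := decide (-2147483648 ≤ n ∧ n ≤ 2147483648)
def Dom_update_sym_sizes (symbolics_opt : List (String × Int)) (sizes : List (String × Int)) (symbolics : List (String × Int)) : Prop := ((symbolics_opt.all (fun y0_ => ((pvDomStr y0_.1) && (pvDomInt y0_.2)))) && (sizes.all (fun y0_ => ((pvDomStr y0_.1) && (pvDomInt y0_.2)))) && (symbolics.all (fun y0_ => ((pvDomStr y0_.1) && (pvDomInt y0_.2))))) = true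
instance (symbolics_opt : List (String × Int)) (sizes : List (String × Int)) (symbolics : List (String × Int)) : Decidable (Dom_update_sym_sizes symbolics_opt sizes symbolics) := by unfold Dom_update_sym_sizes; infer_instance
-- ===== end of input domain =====

-- B rebuilds the two dicts with comprehensions driven by the targets, instead of A's in-place
-- updates while looping over the source; A mutates sizes/symbolics in place, B returns fresh dicts
-- (return values are identical; the equivalence proved here is about the return value).

-- ===== PORT A =====
def update_sym_sizes (symbolics_opt : List (String × Int)) (sizes : List (String × Int)) (symbolics : List (String × Int)) : (List (String × Int)) × (List (String × Int)) :=
  let dso := PySem.Dict.mk symbolics_opt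
  let r := dso.keys.foldl
    (fun (st : PySem.Dict String Int × PySem.Dict String Int) var =>
      if st.1.contains var then (st.1.insert var (dso.getD var 0), st.2)
      else if st.2.contains var then (st.1, st.2.insert var (dso.getD var 0))
      else st)
    (PySem.Dict.mk sizes, PySem.Dict.mk symbolics)
  (r.1.items, r.2.items)

-- ===== PORT B =====
def update_sym_sizes_alt (symbolics_opt : List (String × Int)) (sizes : List (String × Int)) (symbolics : List (String × Int)) : (List (String × Int)) × (List (String × Int)) :=
  let dso := PySem.Dict.mk symbolics_opt
  let sizes2 := sizes.map (fun p => if dso.contains p.1 then (p.1, dso.getD p.1 0) else p)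
  let symbolics2 := symbolics.map
    (fun p => if dso.contains p.1 = true ∧ p.1 ∉ sizes2.map Prod.fst then (p.1, dso.getD p.1 0) else p)
  (sizes2, symbolics2)

-- ===== PRECONDITION & SPEC =====
def Spec_update_sym_sizes (symbolics_opt : List (String × Int)) (sizes : List (String × Int)) (symbolics : List (String × Int)) (out : (List (String × Int)) × (List (String × Int))) : Prop := out = update_sym_sizes_alt symbolics_opt sizes symbolics
instance (symbolics_opt : List (String × Int)) (sizes : List (String × Int)) (symbolics : List (String × Int)) (out : (List (String × Int)) × (List (String × Int))) : Decidable (Spec_update_sym_sizes symbolics_opt sizes symbolics out) := by unfold Spec_update_sym_sizes; infer_instance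

-- ===== CLAIM (what is proved, stated in full; the proofs are below) =====
def Claim_equal_update_sym_sizes : Prop := ∀ (symbolics_opt : List (String × Int)) (sizes : List (String × Int)) (symbolics : List (String × Int)), Dom_update_sym_sizes symbolics_opt sizes symbolics → Spec_update_sym_sizes symbolics_opt sizes symbolics (update_sym_sizes symbolics_opt sizes symbolics)

-- ===== LEMMAS AND PROOFS =====

-- The loop of A, characterised: folding A's step over keys `ks` turns the items of the two
-- state dicts into maps over the original items.
lemma usz_fold_items (f : String → Int) (ks : List String) (S Y : PySem.Dict String Int) :
    ((ks.foldl
      (fun (st : PySem.Dict String Int × PySem.Dict String Int) var =>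
        if st.1.contains var then (st.1.insert var (f var), st.2)
        else if st.2.contains var then (st.1, st.2.insert var (f var))
        else st)
      (S, Y)).1.items
      = S.items.map (fun p => if p.1 ∈ ks then (p.1, f p.1) else p))
    ∧ ((ks.foldl
      (fun (st : PySem.Dict String Int × PySem.Dict String Int) var =>
        if st.1.contains var then (st.1.insert var (f var), st.2)
        else if st.2.contains var then (st.1, st.2.insert var (f var))
        else st)
      (S, Y)).2.items
      = Y.items.map (fun p => if p.1 ∈ ks ∧ p.1 ∉ S.keys then (p.1, f p.1) else p)) := by
  induction ks generalizing S Y with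
  | nil => simp
  | cons k ks ih =>
    simp only [List.foldl_cons]
    by_cases h1 : S.contains k = true
    · rw [if_pos h1]
      have hk : k ∈ S.keys := (PySem.Dict.contains_iff_mem_keys _ _).1 h1
      obtain ⟨ih1, ih2⟩ := ih (S.insert k (f k)) Y
      refine ⟨?_, ?_⟩
      · rw [ih1, PySem.Dict.items_insert_of_contains _ _ h1, List.map_map]
        refine List.map_congr_left (fun p _ => ?_)
        by_cases hp : p.1 = k
        · simp [Function.comp, hp]
        · simp [Function.comp, hp, List.mem_cons]
      · rw [ih2, PySem.Dict.keys_insert_of_contains _ _ h1]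
        refine List.map_congr_left (fun p _ => ?_)
        by_cases hp : p.1 = k
        · simp [hp, hk]
        · simp [hp, List.mem_cons]
    · rw [if_neg h1]
      have hk : k ∉ S.keys := fun h => h1 ((PySem.Dict.contains_iff_mem_keys _ _).2 h)
      by_cases h2 : Y.contains k = true
      · rw [if_pos h2]
        obtain ⟨ih1, ih2⟩ := ih S (Y.insert k (f k))
        refine ⟨?_, ?_⟩
        · rw [ih1]
          refine List.map_congr_left (fun p hp => ?_)
          have : p.1 ∈ S.keys := List.mem_map_of_mem hp
          have hne : p.1 ≠ k := fun h => hk (h ▸ this)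
          simp [hne, List.mem_cons]
        · rw [ih2, PySem.Dict.items_insert_of_contains _ _ h2, List.map_map]
          refine List.map_congr_left (fun p _ => ?_)
          by_cases hp : p.1 = k
          · simp [Function.comp, hp, hk]
          · simp [Function.comp, hp, List.mem_cons]
      · rw [if_neg h2]
        have hky : k ∉ Y.keys := fun h => h2 ((PySem.Dict.contains_iff_mem_keys _ _).2 h)
        obtain ⟨ih1, ih2⟩ := ih S Y
        refine ⟨?_, ?_⟩
        · rw [ih1]
          refine List.map_congr_left (fun p hp => ?_)
          have : p.1 ∈ S.keys := List.mem_map_of_mem hp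
          have hne : p.1 ≠ k := fun h => hk (h ▸ this)
          simp [hne, List.mem_cons]
        · rw [ih2]
          refine List.map_congr_left (fun p hp => ?_)
          have : p.1 ∈ Y.keys := List.mem_map_of_mem hp
          have hne : p.1 ≠ k := fun h => hky (h ▸ this)
          simp [hne, List.mem_cons]

-- The first components of B's rebuilt sizes list are unchanged.
lemma usz_map_fst (dso : PySem.Dict String Int) (sizes : List (String × Int)) :
    (sizes.map (fun p => if dso.contains p.1 then (p.1, dso.getD p.1 0) else p)).map Prod.fst
      = sizes.map Prod.fst := by
  rw [List.map_map]
  refine List.map_congr_left (fun p _ => ?_)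
  by_cases hp : dso.contains p.1 = true <;> simp [Function.comp, hp]

-- ===== VERDICT (by name: the statement is the Claim_ definition above) =====
theorem update_sym_sizes_spec : Claim_equal_update_sym_sizes := by
  intro so sizes symbolics _
  unfold Spec_update_sym_sizes update_sym_sizes update_sym_sizes_alt
  obtain ⟨h1, h2⟩ := usz_fold_items (fun v => (PySem.Dict.mk so).getD v 0)
      (PySem.Dict.mk so).keys (PySem.Dict.mk sizes) (PySem.Dict.mk symbolics)
  simp only []
  rw [h1, h2, usz_map_fst]
  simp only [Prod.mk.injEq]
  constructor
  · refine List.map_congr_left (fun p _ => ?_)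
    rw [PySem.Dict.contains_eq_decide_mem_keys]
    simp only [PySem.Dict.keys, decide_eq_true_eq]
    rfl
  · refine List.map_congr_left (fun p _ => ?_)
    rw [PySem.Dict.contains_eq_decide_mem_keys]
    simp only [PySem.Dict.keys, decide_eq_true_eq]
    split_ifs with h <;> simp_all
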